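-- pv_equiv track=rewrite | github.com/texpress30/scripts | apps/backend/tests/test_magento_connector.py | _match_endpoint
-- ===== SOURCE A (Python) =====
-- from typing import Any
--
-- def _match_endpoint(endpoint: str, response_map: dict[str, list[Any]]) -> str:
--     # Exact match wins; otherwise pick the longest registered prefix that
--     # matches the start of ``endpoint``. Lets tests register
--     # ``"configurable-products"`` once and serve every child fetch.
--     if endpoint in response_map:
--         return endpoint
--     best = ""
--     for key in response_map:
--         if endpoint.startswith(key) and len(key) > len(best):
--             best = key
--     return best
-- ===== SOURCE B (Python) =====
-- def _match_endpoint(endpoint: str, response_map: dict[str, list]) -> str: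
--     # Probe the registered key lengths from longest to shortest: for each
--     # distinct length that fits, one dict hash lookup of that prefix of
--     # endpoint decides; the first hit is the longest matching prefix (the
--     # full length covers the exact match), and "" is the fallback.
--     for n in sorted({len(key) for key in response_map if len(key) <= len(endpoint)}, reverse=True):
--         cand = endpoint[:n]
--         if cand in response_map:
--             return cand
--     return ""
-- ===== Notes on version B (the rewrite author's own statement) =====
-- stated objective: alternative
-- what changed: Instead of scanning every registered key and keeping the longest startswith match, B sorts the distinct registered key lengths descending and returns the first prefix of endpoint of such a length found by dict hash lookup.
import Mathlib
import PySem

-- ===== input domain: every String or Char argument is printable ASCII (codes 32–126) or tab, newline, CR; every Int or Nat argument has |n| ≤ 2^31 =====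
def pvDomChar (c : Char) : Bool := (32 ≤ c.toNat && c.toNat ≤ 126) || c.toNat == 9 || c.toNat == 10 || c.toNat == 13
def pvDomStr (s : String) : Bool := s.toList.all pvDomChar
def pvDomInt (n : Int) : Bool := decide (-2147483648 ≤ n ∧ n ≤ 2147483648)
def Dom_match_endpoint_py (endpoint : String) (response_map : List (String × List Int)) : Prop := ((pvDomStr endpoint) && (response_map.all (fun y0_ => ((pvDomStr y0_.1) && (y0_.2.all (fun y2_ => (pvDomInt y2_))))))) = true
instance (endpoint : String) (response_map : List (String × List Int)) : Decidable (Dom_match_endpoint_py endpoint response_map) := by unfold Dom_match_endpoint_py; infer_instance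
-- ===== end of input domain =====

-- B replaces A's best-so-far scan over all registered keys by probing the distinct
-- registered key lengths, longest first, with one dict hash lookup per length
-- (alternative algorithm; same return value everywhere).


-- ===== PORT A =====
-- `endpoint in response_map` / `for key in response_map`: dict keys = first components
def match_endpoint_py (endpoint : String) (response_map : List (String × List Int)) : String :=
  if response_map.any (fun kv => kv.1 == endpoint) then endpoint
  else
    response_map.foldl
      (fun best kv =>
        if PySem.Str.startswith endpoint kv.1 && (PySem.Str.len best < PySem.Str.len kv.1)
        then kv.1 else best)
      ""

-- ===== PORT B =====
-- the loop over sorted({len(key) ...}, reverse=True) as structural recursion on that list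
def matchEndpointAltGo (endpoint : String) (response_map : List (String × List Int)) : List Int → String
  | [] => ""
  | n :: rest =>
      let cand := PySem.Str.slice endpoint none (some n)
      if response_map.any (fun kv => kv.1 == cand) then cand
      else matchEndpointAltGo endpoint response_map rest

def match_endpoint_py_alt (endpoint : String) (response_map : List (String × List Int)) : String :=
  matchEndpointAltGo endpoint response_map
    (PySem.List.sorted
      (PySem.Set.ofList
        ((response_map.filter
            (fun kv => PySem.Str.len kv.1 ≤ PySem.Str.len endpoint)).map
          (fun kv => PySem.Str.len kv.1)))
      (fun x => x) true)

-- ===== PRECONDITION & SPEC =====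
def Spec_match_endpoint_py (endpoint : String) (response_map : List (String × List Int)) (out : String) : Prop := out = match_endpoint_py_alt endpoint response_map
instance (endpoint : String) (response_map : List (String × List Int)) (out : String) : Decidable (Spec_match_endpoint_py endpoint response_map out) := by unfold Spec_match_endpoint_py; infer_instance

-- ===== CLAIM (what is proved, stated in full; the proofs are below) =====
def Claim_equal_match_endpoint_py : Prop := ∀ (endpoint : String) (response_map : List (String × List Int)), Dom_match_endpoint_py endpoint response_map → Spec_match_endpoint_py endpoint response_map (match_endpoint_py endpoint response_map)

-- ===== LEMMAS AND PROOFS =====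

theorem pv_contains_iff (m : List (String × List Int)) (s : String) :
    (m.any (fun kv => kv.1 == s) = true) ↔ ∃ kv ∈ m, kv.1 = s := by
  simp [List.any_eq_true, beq_iff_eq]

theorem pv_startswith_iff (e s : String) :
    PySem.Str.startswith e s = true ↔ s.toList <+: e.toList := by
  simp [PySem.Str.startswith_eq, PySem.Chars.startswith, List.isPrefixOf_iff_prefix]

-- invariant of A's fold: the best is a prefix of the endpoint, is the initial value or a key,
-- never shrinks, and dominates the length of every matching key seen
theorem pv_foldA_spec (e : String) (l : List (String × List Int)) (b : String)
    (hb : b.toList <+: e.toList) :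
    let r := l.foldl (fun best kv =>
      if PySem.Str.startswith e kv.1 && (PySem.Str.len best < PySem.Str.len kv.1)
      then kv.1 else best) b
    r.toList <+: e.toList ∧ b.toList.length ≤ r.toList.length ∧
      (r = b ∨ ∃ kv ∈ l, kv.1 = r) ∧
      (∀ kv ∈ l, PySem.Str.startswith e kv.1 = true → kv.1.toList.length ≤ r.toList.length) := by
  induction l generalizing b with
  | nil => exact ⟨hb, le_refl _, Or.inl rfl, by simp⟩
  | cons kv l ih =>
    simp only [List.foldl_cons]
    split_ifs with hc
    · rw [Bool.and_eq_true, decide_eq_true_eq] at hc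
      obtain ⟨hsw, hlen⟩ := hc
      have hpre : kv.1.toList <+: e.toList := (pv_startswith_iff e kv.1).mp hsw
      obtain ⟨h1, h2, h3, h4⟩ := ih kv.1 hpre
      refine ⟨h1, ?_, ?_, ?_⟩
      · have : b.toList.length < kv.1.toList.length := by
          simpa [PySem.Str.len_eq] using hlen
        omega
      · rcases h3 with h | ⟨kv', hkv', hkv'e⟩
        · exact Or.inr ⟨kv, by simp, h.symm⟩
        · exact Or.inr ⟨kv', by simp [hkv'], hkv'e⟩
      · intro kv' hkv' hsw'
        rcases List.mem_cons.mp hkv' with h | h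
        · subst h; exact h2
        · exact h4 kv' h hsw'
    · obtain ⟨h1, h2, h3, h4⟩ := ih b hb
      refine ⟨h1, h2, ?_, ?_⟩
      · rcases h3 with h | ⟨kv', hkv', hkv'e⟩
        · exact Or.inl h
        · exact Or.inr ⟨kv', by simp [hkv'], hkv'e⟩
      · intro kv' hkv' hsw'
        rcases List.mem_cons.mp hkv' with h | h
        · subst h
          have hnlt : ¬ (PySem.Str.len b < PySem.Str.len kv'.1) := by
            intro hlt
            exact hc (by rw [Bool.and_eq_true, decide_eq_true_eq]; exact ⟨hsw', hlt⟩)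
          have : kv'.1.toList.length ≤ b.toList.length := by
            have := not_lt.mp hnlt
            simpa [PySem.Str.len_eq] using this
          omega
        · exact h4 kv' h hsw'

-- `endpoint[:n]` for 0 ≤ n is take n.toNat on the character list
theorem pv_pref_int_toList (e : String) (n : Int) (hn : 0 ≤ n) :
    (PySem.Str.slice e none (some n)).toList = e.toList.take n.toNat := by
  simp [PySem.Str.toList_slice, PySem.Chars.slice_eq_listSlice, PySem.List.slice_to _ hn]

-- A's result is a prefix of the endpoint, is "" or a key, and dominates every matching key
theorem pv_A_spec (e : String) (m : List (String × List Int)) :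
    (match_endpoint_py e m).toList <+: e.toList ∧
      ((match_endpoint_py e m) = "" ∨ ∃ kv ∈ m, kv.1 = match_endpoint_py e m) ∧
      (∀ kv ∈ m, PySem.Str.startswith e kv.1 = true →
        kv.1.toList.length ≤ (match_endpoint_py e m).toList.length) := by
  unfold match_endpoint_py
  by_cases hex : m.any (fun kv => kv.1 == e) = true
  · rw [if_pos hex]
    obtain ⟨kv, hkv, hkve⟩ := (pv_contains_iff m e).mp hex
    refine ⟨List.prefix_refl _, Or.inr ⟨kv, hkv, hkve⟩, ?_⟩
    intro kv' hkv' hsw'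
    exact ((pv_startswith_iff e kv'.1).mp hsw').length_le
  · rw [if_neg hex]
    obtain ⟨h1, _, h3, h4⟩ := pv_foldA_spec e m "" (by simp)
    exact ⟨h1, h3, h4⟩

-- the length list B walks: membership and descending strict order
theorem pv_lens_mem (e : String) (m : List (String × List Int)) (n : Int) :
    n ∈ (PySem.List.sorted
      (PySem.Set.ofList
        ((m.filter (fun kv => PySem.Str.len kv.1 ≤ PySem.Str.len e)).map
          (fun kv => PySem.Str.len kv.1))) (fun x => x) true) ↔
    ∃ kv ∈ m, PySem.Str.len kv.1 = n ∧ n ≤ PySem.Str.len e := by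
  rw [PySem.List.mem_sorted, PySem.Set.mem_ofList]
  simp only [List.mem_map, List.mem_filter, decide_eq_true_eq]
  constructor
  · rintro ⟨kv, ⟨hkv, hle⟩, rfl⟩
    exact ⟨kv, hkv, rfl, hle⟩
  · rintro ⟨kv, hkv, rfl, hle⟩
    exact ⟨kv, ⟨hkv, hle⟩, rfl⟩

theorem pv_lens_sorted (e : String) (m : List (String × List Int)) :
    (PySem.List.sorted
      (PySem.Set.ofList
        ((m.filter (fun kv => PySem.Str.len kv.1 ≤ PySem.Str.len e)).map
          (fun kv => PySem.Str.len kv.1))) (fun x => x) true).Pairwise (fun a b => b < a) := by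
  have hpair := PySem.List.sorted_pairwise_rev
    (xs := (PySem.Set.ofList
        ((m.filter (fun kv => PySem.Str.len kv.1 ≤ PySem.Str.len e)).map
          (fun kv => PySem.Str.len kv.1)))) (key := fun (x : Int) => x)
  have hnd : (PySem.List.sorted
      (PySem.Set.ofList
        ((m.filter (fun kv => PySem.Str.len kv.1 ≤ PySem.Str.len e)).map
          (fun kv => PySem.Str.len kv.1))) (fun x => x) true).Nodup :=
    (PySem.List.sorted_perm _ _ _).symm.nodup (PySem.Set.nodup_ofList _)
  have := hpair.and hnd
  exact this.imp (fun h => lt_of_le_of_ne h.1 (Ne.symm h.2))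

-- characterisation of B's walk over a strictly descending length list
theorem pv_altGo_spec (e : String) (m : List (String × List Int)) (L : List Int)
    (hL : L.Pairwise (fun a b => b < a)) :
    (matchEndpointAltGo e m L = "" ∧
      ∀ n ∈ L, m.any (fun kv => kv.1 == PySem.Str.slice e none (some n)) = false) ∨
    (∃ n ∈ L, matchEndpointAltGo e m L = PySem.Str.slice e none (some n) ∧
      m.any (fun kv => kv.1 == PySem.Str.slice e none (some n)) = true ∧
      ∀ n' ∈ L, n < n' → m.any (fun kv => kv.1 == PySem.Str.slice e none (some n')) = false) := by
  induction L with
  | nil => exact Or.inl ⟨rfl, by simp⟩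
  | cons n rest ih =>
    rcases List.pairwise_cons.mp hL with ⟨hhead, htail⟩
    by_cases h : m.any (fun kv => kv.1 == PySem.Str.slice e none (some n)) = true
    · refine Or.inr ⟨n, by simp, ?_, h, ?_⟩
      · simp only [matchEndpointAltGo]; rw [if_pos h]
      · intro n' hn' hlt
        rcases List.mem_cons.mp hn' with rfl | hmem
        · omega
        · exact absurd (hhead n' hmem) (by omega)
    · have hstep : matchEndpointAltGo e m (n :: rest) = matchEndpointAltGo e m rest := by
        simp only [matchEndpointAltGo]; rw [if_neg h]
      rcases ih htail with ⟨hres, hall⟩ | ⟨n0, hn0, hres, hcont, hmax⟩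
      · refine Or.inl ⟨by rw [hstep]; exact hres, ?_⟩
        intro n' hn'
        rcases List.mem_cons.mp hn' with rfl | hmem
        · exact Bool.eq_false_iff.mpr h
        · exact hall n' hmem
      · refine Or.inr ⟨n0, by simp [hn0], by rw [hstep]; exact hres, hcont, ?_⟩
        intro n' hn' hlt
        rcases List.mem_cons.mp hn' with rfl | hmem
        · exact Bool.eq_false_iff.mpr h
        · exact hmax n' hmem hlt

-- ===== VERDICT (by name: the statement is the Claim_ definition above) =====
theorem match_endpoint_py_spec : Claim_equal_match_endpoint_py := by
  intro e m _
  show match_endpoint_py e m = match_endpoint_py_alt e m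
  obtain ⟨hpre, hkey, hmaxA⟩ := pv_A_spec e m
  set rA := match_endpoint_py e m with hrA
  unfold match_endpoint_py_alt
  set lens := PySem.List.sorted
      (PySem.Set.ofList
        ((m.filter (fun kv => PySem.Str.len kv.1 ≤ PySem.Str.len e)).map
          (fun kv => PySem.Str.len kv.1))) (fun x => x) true with hlens
  -- if rA is a registered key, its length is walked and its prefix lookup succeeds
  have hAkey : ∀ kv ∈ m, kv.1 = rA →
      (((rA.toList.length : Int)) ∈ lens ∧
        m.any (fun kv => kv.1 == PySem.Str.slice e none (some ((rA.toList.length : Int)))) = true) := by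
    intro kv hkv hkve
    have hlenA : rA.toList.length ≤ e.toList.length := hpre.length_le
    constructor
    · rw [hlens, pv_lens_mem]
      refine ⟨kv, hkv, ?_, ?_⟩
      · rw [PySem.Str.len_eq, hkve]
      · rw [PySem.Str.len_eq]
        exact_mod_cast hlenA
    · have heq : PySem.Str.slice e none (some ((rA.toList.length : Int))) = rA := by
        apply String.toList_inj.mp
        rw [pv_pref_int_toList e _ (by positivity)]
        simp only [Int.toNat_natCast]
        exact (List.prefix_iff_eq_take.mp hpre).symm
      rw [heq]
      exact (pv_contains_iff m rA).mpr ⟨kv, hkv, hkve⟩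
  rcases pv_altGo_spec e m lens (by rw [hlens]; exact pv_lens_sorted e m) with
    ⟨hres, hall⟩ | ⟨n, hn, hres, hcont, hmaxB⟩
  · -- B found nothing: no registered key is a prefix of e, so A's best is ""
    rw [hres]
    rcases hkey with h | ⟨kv, hkv, hkve⟩
    · exact h
    · have := hAkey kv hkv hkve
      rw [hall _ this.1] at this
      exact absurd this.2 Bool.false_ne_true
  · -- B returns e[:n]; A's best has the same length, hence is the same prefix
    rw [hres]
    have hn0 : 0 ≤ n := by
      rw [hlens, pv_lens_mem] at hn
      obtain ⟨kv, _, hlen, _⟩ := hn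
      rw [PySem.Str.len_eq] at hlen; omega
    have hnle : n ≤ (e.toList.length : Int) := by
      rw [hlens, pv_lens_mem] at hn
      obtain ⟨kv, _, _, hle⟩ := hn
      rwa [PySem.Str.len_eq] at hle
    have hplen : (PySem.Str.slice e none (some n)).toList.length = n.toNat := by
      rw [pv_pref_int_toList e n hn0, List.length_take]
      omega
    -- the found prefix is itself a registered key that matches, so A dominates its length
    obtain ⟨kv, hkv, hkve⟩ := (pv_contains_iff m _).mp hcont
    have hswn : PySem.Str.startswith e kv.1 = true := by
      rw [pv_startswith_iff, hkve, pv_pref_int_toList e n hn0]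
      exact List.take_prefix _ _
    have hAge : n.toNat ≤ rA.toList.length := by
      have := hmaxA kv hkv hswn
      rwa [hkve, hplen] at this
    rcases hkey with h | ⟨kv', hkv', hkv'e⟩
    · -- rA = "" forces n = 0, and e[:0] = ""
      have hz : n.toNat = 0 := by
        have : rA.toList.length = 0 := by rw [h]; rfl
        omega
      have hn00 : n = 0 := by omega
      subst hn00
      rw [h]
      apply String.toList_inj.mp
      rw [pv_pref_int_toList e 0 le_rfl]
      simp
    · -- rA is a registered key: B's maximality bounds its length by n
      obtain ⟨hmem, hcontA⟩ := hAkey kv' hkv' hkv'e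
      have hle : (rA.toList.length : Int) ≤ n := by
        by_contra hgt
        rw [hmaxB _ hmem (by omega)] at hcontA
        exact absurd hcontA Bool.false_ne_true
      have hlen2 : rA.toList.length = n.toNat := by omega
      apply String.toList_inj.mp
      rw [pv_pref_int_toList e n hn0, ← hlen2]
      exact List.prefix_iff_eq_take.mp hpre
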